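-- pv_equiv track=rewrite | github.com/KraszewskiK/AdventOfCode2025 | aoc/day02.py | get_ids_of_length
-- ===== SOURCE A (Python) =====
-- def n2nn(n: int) -> int:
--     return n * (10 ** (len(str(n)))) + n
--
-- def get_ids_of_length(length):
--     if length % 2 != 0:
--         return
--     cur_len = length // 2
--     start = 10 ** (cur_len - 1)
--     end = 10 ** cur_len - 1
--     for n in range(n2nn(start), n2nn(end) + 1, 10 ** cur_len + 1):
--         yield n
-- ===== SOURCE B (Python) =====
-- def get_ids_of_length(length):
--     # B: enumerate the half recursively digit by digit (a DFS over the digit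
--     # tree: first digit 1-9, each further position 0-9), yielding
--     # prefix*10**cur_len + prefix at the leaves -- no numeric range over
--     # halves or ids and no n2nn string helper.
--     if length % 2 != 0:
--         return
--     cur_len = length // 2
--
--     def gen(prefix, remaining):
--         if remaining == 0:
--             yield prefix * 10 ** cur_len + prefix
--         else:
--             for d in range(10):
--                 yield from gen(prefix * 10 + d, remaining - 1)
--
--     for first in range(1, 10):
--         yield from gen(first, cur_len - 1)
-- ===== Notes on version B (the rewrite author's own statement) =====
-- stated objective: alternative
-- what changed: B replaces A's closed-form arithmetic-progression range over the ids (and the string-length helper n2nn) by a recursive depth-first enumeration of the half, one decimal digit per recursion level, yielding the id built from each completed prefix at the leaves.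
-- outside the precondition, e.g. on get_ids_of_length(0): A raises TypeError, B raises RecursionError
import Mathlib
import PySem

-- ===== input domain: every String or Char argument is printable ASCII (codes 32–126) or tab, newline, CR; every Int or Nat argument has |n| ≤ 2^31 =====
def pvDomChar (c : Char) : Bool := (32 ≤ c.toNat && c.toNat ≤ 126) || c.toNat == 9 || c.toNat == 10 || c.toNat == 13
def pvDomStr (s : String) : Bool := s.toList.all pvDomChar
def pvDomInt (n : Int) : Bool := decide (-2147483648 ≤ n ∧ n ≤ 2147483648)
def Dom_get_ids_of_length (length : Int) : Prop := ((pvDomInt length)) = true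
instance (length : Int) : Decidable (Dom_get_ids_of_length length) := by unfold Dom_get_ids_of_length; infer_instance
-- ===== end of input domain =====

-- B enumerates the half recursively digit by digit (DFS over the digit tree) instead of
-- A's arithmetic-progression range over the ids with the string-length helper n2nn.

-- ===== PORT A =====
def n2nn (n : Int) : Int :=
  n * 10 ^ (PySem.Str.len (PySem.Int.toStr n)).toNat + n

def get_ids_of_length (length : Int) : List Int :=
  if PySem.Int.mod length 2 ≠ 0 then []
  else
    let cur_len := PySem.Int.floordiv length 2
    -- '10 ** e' with e < 0 is a Python float and makes range raise TypeError;
    -- those inputs are outside Pre_, so '.toNat' clamping there is harmless.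
    let start := (10 : Int) ^ (cur_len - 1).toNat
    let stop := (10 : Int) ^ cur_len.toNat - 1
    PySem.List.pyRange (n2nn start) (n2nn stop + 1) ((10 : Int) ^ cur_len.toNat + 1)

-- ===== PORT B =====
-- 'def gen(prefix, remaining)': recursive digit DFS; 'yield from' a loop = flatMap.
-- 'remaining' is a Nat: inside Pre_ it starts at cur_len - 1 ≥ 0 and only counts down to 0,
-- exactly Python's recursion (outside Pre_ the Python B never returns).
def genHalf (k : Nat) (pfx : Int) : Nat → List Int
  | 0 => [pfx * 10 ^ k + pfx]
  | r + 1 => (PySem.List.pyRange 0 10 1).flatMap (fun d => genHalf k (pfx * 10 + d) r)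

def get_ids_of_length_alt (length : Int) : List Int :=
  if PySem.Int.mod length 2 ≠ 0 then []
  else
    let cur_len := PySem.Int.floordiv length 2
    (PySem.List.pyRange 1 10 1).flatMap
      (fun first => genHalf cur_len.toNat first (cur_len - 1).toNat)

-- ===== PRECONDITION & SPEC =====
-- Pre_ excludes even length ≤ 0: there cur_len ≤ 0, so A's 10 ** (cur_len - 1) is a float and
-- range raises TypeError, while B recurses without reaching remaining == 0 (neither returns).
def Pre_get_ids_of_length (length : Int) : Prop :=
  PySem.Int.mod length 2 ≠ 0 ∨ 2 ≤ length
instance (length : Int) : Decidable (Pre_get_ids_of_length length) := by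
  unfold Pre_get_ids_of_length; infer_instance

def pvWitness_get_ids_of_length : Int := 4

def Spec_get_ids_of_length (length : Int) (out : List Int) : Prop := out = get_ids_of_length_alt length
instance (length : Int) (out : List Int) : Decidable (Spec_get_ids_of_length length out) := by unfold Spec_get_ids_of_length; infer_instance

-- ===== CLAIM (what is proved, stated in full; the proofs are below) =====
def Claim_equal_get_ids_of_length : Prop := ∀ (length : Int), Dom_get_ids_of_length length → Pre_get_ids_of_length length → Spec_get_ids_of_length length (get_ids_of_length length)

-- ===== LEMMAS AND PROOFS =====

-- Exact length of `Nat.toDigitsCore`: one char per base-`b` digit, plus the accumulator.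
lemma toDigitsCore_length_eq (b : Nat) (hb : 2 ≤ b) :
    ∀ (f n : Nat) (acc : List Char), n < f →
      (Nat.toDigitsCore b f n acc).length = acc.length + Nat.log b n + 1 := by
  intro f
  induction f with
  | zero => intro n acc h; omega
  | succ f ih =>
    intro n acc h
    rw [Nat.toDigitsCore]
    by_cases hd : n / b = 0
    · have hnb : n < b := by
        rcases Nat.div_eq_zero_iff.mp hd with h0 | h1
        · omega
        · exact h1
      simp [hd, Nat.log_eq_zero_iff.mpr (Or.inl hnb)]
    · have hbn : b ≤ n := by
        by_contra hc
        exact hd (Nat.div_eq_of_lt (by omega))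
      have hlt : n / b < f := by
        have := Nat.div_lt_self (by omega : 0 < n) (by omega : 1 < b)
        omega
      simp only [hd, if_false]
      rw [ih (n / b) (Nat.digitChar (n % b) :: acc) hlt]
      have hlog : Nat.log b (n / b) = Nat.log b n - 1 := Nat.log_div_base b n
      have hpos : 0 < Nat.log b n := Nat.log_pos (by omega) hbn
      simp only [List.length_cons]
      omega

-- len(str(n)) for a positive int is its decimal digit count.
lemma len_toStr_pos (n : Int) (h : 1 ≤ n) :
    (PySem.Str.len (PySem.Int.toStr n)).toNat = Nat.log 10 n.toNat + 1 := by
  have hn : ¬ n < 0 := by omega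
  have : (PySem.Int.toStr n).toList = Nat.toDigits 10 n.toNat := by
    rw [PySem.Int.toList_toStr]
    simp [PySem.Int.toChars, hn]
  rw [PySem.Str.len, this, Nat.toDigits,
    toDigitsCore_length_eq 10 (by norm_num) _ _ _ (Nat.lt_succ_self _)]
  simp

-- A stride-p range starting/ending at multiples of p is the map (·*p) of a unit range.
lemma pyRange_mul (a b p : Int) (hp : 0 < p) (hab : a ≤ b) :
    PySem.List.pyRange (a * p) (b * p + 1) p
      = (PySem.List.pyRange a (b + 1) 1).map (fun h => h * p) := by
  rw [PySem.List.pyRange_of_pos _ _ hp, PySem.List.pyRange_of_pos _ _ Int.zero_lt_one]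
  have h1 : a * p < b * p + 1 := by nlinarith
  have h2 : a < b + 1 := by omega
  have h3 : b * p + 1 - a * p + p - 1 = (b - a + 1) * p := by ring
  rw [if_pos h1, if_pos h2, h3, Int.mul_ediv_cancel _ (ne_of_gt hp), List.map_map]
  have h4 : b + 1 - a + 1 - 1 = b - a + 1 := by ring
  rw [h4, Int.ediv_one]
  apply List.map_congr_left
  intro k _
  simp only [Function.comp_apply]
  ring

lemma log_pow_pred (k : Nat) (hk : 1 ≤ k) : Nat.log 10 (10 ^ k - 1) = k - 1 := by
  apply Nat.log_eq_of_pow_le_of_lt_pow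
  · have h1 : 10 ^ (k - 1) < 10 ^ k := Nat.pow_lt_pow_right (by norm_num) (by omega)
    omega
  · have hk' : k - 1 + 1 = k := by omega
    have h2 : (0:Nat) < 10 ^ k := pow_pos (by norm_num) k
    rw [hk']
    omega

-- m consecutive blocks [d*s, (d+1)*s) for d in [a, a+m) concatenate to [a*s, (a+m)*s).
lemma flatMap_blocks (s : Int) (hs : 1 ≤ s) (a : Int) : ∀ (m : Nat),
    (PySem.List.pyRange a (a + m) 1).flatMap
        (fun d => PySem.List.pyRange (d * s) ((d + 1) * s) 1)
      = PySem.List.pyRange (a * s) ((a + m) * s) 1 := by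
  intro m
  induction m with
  | zero =>
    rw [Nat.cast_zero, add_zero, PySem.List.pyRange_one_eq_nil le_rfl, List.flatMap_nil,
      PySem.List.pyRange_one_eq_nil (le_refl (a * s))]
  | succ m ih =>
    have hm : ((m + 1 : Nat) : Int) = (m : Int) + 1 := by push_cast; ring
    rw [hm, show a + ((m : Int) + 1) = (a + m) + 1 from by ring,
      PySem.List.pyRange_one_succ_right (by nlinarith [Int.natCast_nonneg m]),
      List.flatMap_append, ih]
    simp only [List.flatMap_cons, List.flatMap_nil, List.append_nil]
    rw [PySem.List.pyRange_one_append (a * s) ((a + m) * s) ((a + m + 1) * s)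
      (by nlinarith [Int.natCast_nonneg m]) (by nlinarith)]

-- Shift the index of a flatMap over a unit range.
lemma flatMap_shift {α : Type} (a b t : Int) (g : Int → List α) :
    (PySem.List.pyRange a b 1).flatMap (fun d => g (t + d))
      = (PySem.List.pyRange (t + a) (t + b) 1).flatMap g := by
  rw [PySem.List.pyRange_one, PySem.List.pyRange_one,
    show t + b - (t + a) = b - a from by ring, List.flatMap_map, List.flatMap_map]
  apply List.flatMap_congr
  intro k _
  rw [add_assoc]

-- The digit DFS over r free positions below prefix p yields exactly the halves
-- p*10^r .. (p+1)*10^r - 1 in order, each mapped to h*10^k + h.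
lemma genHalf_eq (k : Nat) : ∀ (r : Nat) (p : Int),
    genHalf k p r
      = (PySem.List.pyRange (p * 10 ^ r) ((p + 1) * 10 ^ r) 1).map
          (fun h => h * 10 ^ k + h) := by
  intro r
  induction r with
  | zero =>
    intro p
    simp [genHalf, PySem.List.pyRange_one_singleton]
  | succ r ih =>
    intro p
    have hstep : genHalf k p (r + 1)
        = (PySem.List.pyRange 0 10 1).flatMap (fun d => genHalf k (p * 10 + d) r) := rfl
    rw [hstep]
    have hfn : (fun d => genHalf k (p * 10 + d) r)
        = fun d => (PySem.List.pyRange ((p * 10 + d) * 10 ^ r) ((p * 10 + d + 1) * 10 ^ r) 1).map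
            (fun h => h * 10 ^ k + h) := by
      funext d; rw [ih]
    rw [hfn, ← List.map_flatMap,
      flatMap_shift 0 10 (p * 10) (fun d => PySem.List.pyRange (d * 10 ^ r) ((d + 1) * 10 ^ r) 1)]
    have h9 : p * 10 + 10 = p * 10 + ((10 : Nat) : Int) := by norm_num
    rw [show p * 10 + 0 = p * 10 from by ring, h9,
      flatMap_blocks (10 ^ r) (one_le_pow₀ (by norm_num)) (p * 10) 10]
    congr 1
    push_cast
    ring_nf

-- ===== VERDICT (by name: the statement is the Claim_ definition above) =====
theorem get_ids_of_length_spec : Claim_equal_get_ids_of_length := by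
  intro length _ hPre
  unfold Spec_get_ids_of_length get_ids_of_length get_ids_of_length_alt
  by_cases h : PySem.Int.mod length 2 = 0
  · simp only [h, ne_eq, not_true_eq_false, if_false]
    have h2 : 2 ≤ length := by
      rcases hPre with h' | h'
      · exact absurd h h'
      · exact h'
    set c := PySem.Int.floordiv length 2 with hc
    have hc1 : 1 ≤ c := by
      rw [hc, PySem.Int.floordiv_eq_ediv_of_pos (by norm_num)]
      omega
    set m := (c - 1).toNat with hm
    have hk : c.toNat = m + 1 := by omega
    set k := c.toNat with hkk
    -- start and stop values
    have hs1 : (1 : Int) ≤ 10 ^ m := one_le_pow₀ (by norm_num)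
    have hsk : (10 : Int) * 10 ^ m = 10 ^ k := by rw [hk]; ring
    have hse : (10 : Int) ^ m ≤ 10 ^ k - 1 := by
      have : (10 : Int) ^ m < 10 ^ k := by
        rw [hk]
        exact pow_lt_pow_right₀ (by norm_num) (lt_add_one m)
      omega
    -- digit counts
    have hlen_start : (PySem.Str.len (PySem.Int.toStr ((10:Int) ^ m))).toNat = k := by
      rw [len_toStr_pos _ hs1]
      have : ((10:Int) ^ m).toNat = 10 ^ m := by
        rw [show ((10:Int) ^ m) = ((10 ^ m : Nat) : Int) by push_cast; ring]
        exact Int.toNat_natCast _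
      rw [this, Nat.log_pow (by norm_num)]
      omega
    have hlen_stop : (PySem.Str.len (PySem.Int.toStr ((10:Int) ^ k - 1))).toNat = k := by
      rw [len_toStr_pos _ (le_trans hs1 hse)]
      have : ((10:Int) ^ k - 1).toNat = 10 ^ k - 1 := by
        have hn : (1:Nat) ≤ 10 ^ k := Nat.one_le_pow _ _ (by norm_num)
        rw [show ((10:Int) ^ k - 1) = ((10 ^ k - 1 : Nat) : Int) from by
          rw [Nat.cast_sub hn]; push_cast; ring]
        exact Int.toNat_natCast _
      rw [this, log_pow_pred k (by omega)]
      omega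
    -- A's side: the stride range is the map of the unit half-range
    simp only [n2nn, hlen_start, hlen_stop]
    have hpk : (0:Int) < 10 ^ k := pow_pos (by norm_num) k
    have hmain := pyRange_mul ((10:Int) ^ m) ((10:Int) ^ k - 1) ((10:Int) ^ k + 1)
      (by omega) hse
    rw [show (10:Int) ^ k - 1 + 1 = 10 ^ k from by ring] at hmain
    rw [show (10:Int) ^ m * 10 ^ k + 10 ^ m = 10 ^ m * (10 ^ k + 1) from by ring,
      show ((10:Int) ^ k - 1) * 10 ^ k + ((10:Int) ^ k - 1) + 1
        = (10 ^ k - 1) * (10 ^ k + 1) + 1 from by ring,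
      hmain]
    -- B's side: each DFS block is a map over a unit range; the blocks concatenate
    have hfn : (fun first => genHalf k first m)
        = fun first => (PySem.List.pyRange (first * 10 ^ m) ((first + 1) * 10 ^ m) 1).map
            (fun h' => h' * 10 ^ k + h') := by
      funext first; rw [genHalf_eq]
    rw [hfn, ← List.map_flatMap]
    have h10 : (1 : Int) + ((9 : Nat) : Int) = 10 := by norm_num
    have hblocks := flatMap_blocks ((10:Int) ^ m) hs1 1 9
    rw [h10] at hblocks
    rw [hblocks, one_mul, show (10:Int) * 10 ^ m = 10 ^ k from hsk]
    apply List.map_congr_left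
    intro x _
    ring
  · simp only [ne_eq, h, not_false_eq_true, if_true]
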